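-- pv_equiv track=rewrite | github.com/nannyu/darkoffice | runtime/branches.py | _check_threshold
-- ===== SOURCE A (Python) =====
-- def _check_threshold(state: dict, cond: dict) -> bool:
--     """检查数值阈值条件（*_min、*_max）。"""
--     attrs = ["hp", "en", "st", "kpi", "risk", "cor"]
--     for attr in attrs:
--         value = state.get(attr)
--         if value is None:
--             continue
--         min_key = f"{attr}_min"
--         max_key = f"{attr}_max"
--         if min_key in cond and value < cond[min_key]:
--             return False
--         if max_key in cond and value > cond[max_key]:
--             return False
--     return True
-- ===== SOURCE B (Python) =====
-- _ALLOWED = {"hp", "en", "st", "kpi", "risk", "cor"}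
--
--
-- def _check_threshold(state: dict, cond: dict) -> bool:
--     """Drive the check from the conditions: inspect each cond key instead of scanning the attr list."""
--     for key, threshold in cond.items():
--         suffix = key[-4:]
--         if suffix != "_min" and suffix != "_max":
--             continue
--         attr = key[:-4]
--         if attr not in _ALLOWED:
--             continue
--         value = state.get(attr)
--         if value is None:
--             continue
--         if suffix == "_min":
--             if value < threshold:
--                 return False
--         else:
--             if value > threshold:
--                 return False
--     return True
-- ===== Notes on version B (the rewrite author's own statement) =====
-- stated objective: alternative
-- what changed: B iterates over cond's items and parses each key's '_min'/'_max' suffix back to a base attribute (skipping keys whose base is not one of the six allowed attrs or absent from state), instead of A's scan of the fixed attribute list that builds both candidate keys per attribute; Pre_ only excludes cond association lists with duplicate keys, which cannot arise from a Python dict.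
import Mathlib
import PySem

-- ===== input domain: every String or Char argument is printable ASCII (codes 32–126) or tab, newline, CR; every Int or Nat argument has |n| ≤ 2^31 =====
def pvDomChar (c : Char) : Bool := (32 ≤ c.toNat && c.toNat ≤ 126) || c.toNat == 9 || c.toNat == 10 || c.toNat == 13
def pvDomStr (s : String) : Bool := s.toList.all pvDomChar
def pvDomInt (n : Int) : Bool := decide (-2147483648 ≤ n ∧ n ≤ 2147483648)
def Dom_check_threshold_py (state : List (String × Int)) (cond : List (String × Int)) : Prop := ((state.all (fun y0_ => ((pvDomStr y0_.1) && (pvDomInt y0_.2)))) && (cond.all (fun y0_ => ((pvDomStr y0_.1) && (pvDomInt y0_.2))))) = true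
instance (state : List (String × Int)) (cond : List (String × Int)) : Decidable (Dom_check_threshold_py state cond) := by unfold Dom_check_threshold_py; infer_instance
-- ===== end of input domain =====

-- B drives the check from cond's items (suffix-parsing each key) instead of A's scan of the fixed attribute list; objective: alternative decomposition, same cost.

-- ===== PORT A =====
-- loop 'for attr in attrs' with early 'return False'
def pvGoA (state : List (String × Int)) (cond : List (String × Int)) : List String → Bool
  | [] => true
  | attr :: rest =>
    match List.lookup attr state with          -- value = state.get(attr); None → continue
    | none => pvGoA state cond rest
    | some value =>
      let minKey := attr ++ "_min"
      let maxKey := attr ++ "_max"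
      -- if min_key in cond and value < cond[min_key]: return False
      match List.lookup minKey cond with
      | some m =>
        if value < m then false
        else
          match List.lookup maxKey cond with
          | some mx => if value > mx then false else pvGoA state cond rest
          | none => pvGoA state cond rest
      | none =>
        match List.lookup maxKey cond with
        | some mx => if value > mx then false else pvGoA state cond rest
        | none => pvGoA state cond rest

def check_threshold_py (state : List (String × Int)) (cond : List (String × Int)) : Bool :=
  pvGoA state cond ["hp", "en", "st", "kpi", "risk", "cor"]

-- ===== PORT B =====
def pvAllowed : PySem.Set String := PySem.Set.ofList ["hp", "en", "st", "kpi", "risk", "cor"]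

-- loop 'for key, threshold in cond.items()' with early 'return False'
def pvGoB (state : List (String × Int)) : List (String × Int) → Bool
  | [] => true
  | (key, threshold) :: rest =>
    let suffix := PySem.Str.slice key (some (-4)) none        -- key[-4:]
    if suffix ≠ "_min" ∧ suffix ≠ "_max" then pvGoB state rest
    else
      let attr := PySem.Str.slice key none (some (-4))        -- key[:-4]
      if attr ∉ pvAllowed then pvGoB state rest
      else
        match List.lookup attr state with                     -- value = state.get(attr)
        | none => pvGoB state rest
        | some value =>
          if suffix = "_min" then
            if value < threshold then false else pvGoB state rest
          else
            if value > threshold then false else pvGoB state rest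

def check_threshold_py_alt (state : List (String × Int)) (cond : List (String × Int)) : Bool :=
  pvGoB state cond

-- ===== PRECONDITION & SPEC =====
-- Pre_ excludes association lists whose cond has duplicate keys: a Python dict cannot contain
-- duplicates, and on such lists A's first-match lookup and B's per-item scan could disagree.
def Pre_check_threshold_py (state : List (String × Int)) (cond : List (String × Int)) : Prop :=
  (cond.map Prod.fst).Nodup
instance (state : List (String × Int)) (cond : List (String × Int)) : Decidable (Pre_check_threshold_py state cond) := by unfold Pre_check_threshold_py; infer_instance

def pvWitness_check_threshold_py : (List (String × Int)) × (List (String × Int)) :=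
  ([("hp", 5), ("risk", 9)], [("hp_min", 3), ("risk_max", 4), ("en_min", 0)])

def Spec_check_threshold_py (state : List (String × Int)) (cond : List (String × Int)) (out : Bool) : Prop := out = check_threshold_py_alt state cond
instance (state : List (String × Int)) (cond : List (String × Int)) (out : Bool) : Decidable (Spec_check_threshold_py state cond out) := by unfold Spec_check_threshold_py; infer_instance

-- ===== CLAIM (what is proved, stated in full; the proofs are below) =====
def Claim_equal_check_threshold_py : Prop := ∀ (state : List (String × Int)) (cond : List (String × Int)), Dom_check_threshold_py state cond → Pre_check_threshold_py state cond → Spec_check_threshold_py state cond (check_threshold_py state cond)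

-- ===== LEMMAS AND PROOFS =====

-- per-attribute check of A's loop body
def pvOkA (state : List (String × Int)) (cond : List (String × Int)) (attr : String) : Bool :=
  match List.lookup attr state with
  | none => true
  | some value =>
    (match List.lookup (attr ++ "_min") cond with
     | some m => !(value < m)
     | none => true) &&
    (match List.lookup (attr ++ "_max") cond with
     | some mx => !(value > mx)
     | none => true)

-- per-item check of B's loop body
def pvOkB (state : List (String × Int)) (p : String × Int) : Bool :=
  let suffix := PySem.Str.slice p.1 (some (-4)) none
  if suffix ≠ "_min" ∧ suffix ≠ "_max" then true
  else
    let attr := PySem.Str.slice p.1 none (some (-4))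
    if attr ∉ pvAllowed then true
    else
      match List.lookup attr state with
      | none => true
      | some value =>
        if suffix = "_min" then !(value < p.2) else !(value > p.2)

theorem pvGoA_eq_all (state cond : List (String × Int)) (attrs : List String) :
    pvGoA state cond attrs = attrs.all (pvOkA state cond) := by
  induction attrs with
  | nil => rfl
  | cons a rest ih =>
    simp only [pvGoA, pvOkA, List.all_cons]
    cases List.lookup a state with
    | none => simp [ih]
    | some v =>
      cases List.lookup (a ++ "_min") cond with
      | some m =>
        cases List.lookup (a ++ "_max") cond with
        | some mx => by_cases h1 : v < m <;> by_cases h2 : v > mx <;> simp [h1, h2, ih]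
        | none => by_cases h1 : v < m <;> simp [h1, ih]
      | none =>
        cases List.lookup (a ++ "_max") cond with
        | some mx => by_cases h2 : v > mx <;> simp [h2, ih]
        | none => simp [ih]

theorem pvGoB_eq_all (state cond : List (String × Int)) :
    pvGoB state cond = cond.all (pvOkB state) := by
  induction cond with
  | nil => rfl
  | cons p rest ih =>
    obtain ⟨key, thr⟩ := p
    simp only [pvGoB, pvOkB, List.all_cons]
    by_cases hs : PySem.Str.slice key (some (-4)) none ≠ "_min" ∧ PySem.Str.slice key (some (-4)) none ≠ "_max"
    · simp [hs, ih]
    · simp only [if_neg hs]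
      by_cases ha : PySem.Str.slice key none (some (-4)) ∉ pvAllowed
      · simp [ha, ih]
      · simp only [if_neg ha]
        cases List.lookup (PySem.Str.slice key none (some (-4))) state with
        | none => simp [ih]
        | some v =>
          by_cases hm : PySem.Str.slice key (some (-4)) none = "_min"
          · by_cases h1 : v < thr <;> simp [hm, h1, ih]
          · by_cases h2 : v > thr <;> simp [hm, h2, ih]

theorem pv_lookup_mem {k : String} {v : Int} {l : List (String × Int)}
    (h : List.lookup k l = some v) : (k, v) ∈ l := by
  induction l with
  | nil => simp [List.lookup] at h
  | cons p rest ih =>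
    obtain ⟨k', v'⟩ := p
    by_cases hk : k == k'
    · simp [List.lookup, hk] at h
      simp [eq_of_beq hk, h]
    · simp [List.lookup, hk] at h
      exact List.mem_cons_of_mem _ (ih h)

theorem pv_lookup_of_mem_nodup {k : String} {v : Int} {l : List (String × Int)}
    (hnd : (l.map Prod.fst).Nodup) (h : (k, v) ∈ l) : List.lookup k l = some v := by
  induction l with
  | nil => simp at h
  | cons p rest ih =>
    obtain ⟨k', v'⟩ := p
    simp only [List.map_cons, List.nodup_cons] at hnd
    rcases List.mem_cons.mp h with heq | hmem
    · cases heq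
      simp [List.lookup]
    · have hne : k ≠ k' := by
        rintro rfl
        exact hnd.1 (List.mem_map.mpr ⟨(k, v), hmem, rfl⟩)
      have : (k == k') = false := beq_false_of_ne hne
      simp [List.lookup, this]
      exact ih hnd.2 hmem

-- a key whose last-4 slice is suffix and whose front slice is attr IS attr ++ suffix
theorem pv_key_decomp (key suffix attr : String)
    (hs : PySem.Str.slice key (some (-4)) none = suffix)
    (ha : PySem.Str.slice key none (some (-4)) = attr) :
    key = attr ++ suffix := by
  apply String.toList_inj.mp
  rw [String.toList_append, ← hs, ← ha]
  simp only [PySem.Str.slice, PySem.Chars.slice_eq_listSlice, String.toList_ofList]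
  rw [PySem.List.slice_to_neg_ofNat key.toList 4 (by omega),
      PySem.List.slice_from_neg_ofNat key.toList 4 (by omega)]
  exact (List.take_append_drop _ _).symm

-- B's per-item check passes whenever A's per-attribute check passed on the key's base attribute
theorem pv_okB_of_okA (state cond : List (String × Int))
    (hnd : (cond.map Prod.fst).Nodup) (key : String) (thr : Int)
    (hmem : (key, thr) ∈ cond)
    (hOk : pvOkA state cond (PySem.Str.slice key none (some (-4))) = true) :
    pvOkB state (key, thr) = true := by
  simp only [pvOkB]
  by_cases hs : PySem.Str.slice key (some (-4)) none ≠ "_min" ∧ PySem.Str.slice key (some (-4)) none ≠ "_max"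
  · simp [hs]
  · rw [if_neg hs]
    by_cases ha : PySem.Str.slice key none (some (-4)) ∉ pvAllowed
    · simp [ha]
    · rw [if_neg ha]
      cases hv : List.lookup (PySem.Str.slice key none (some (-4))) state with
      | none => rfl
      | some v =>
        simp only [pvOkA, hv] at hOk
        rw [Bool.and_eq_true] at hOk
        rcases not_and_or.mp hs with hmin | hmax
        · rw [not_not] at hmin
          have hkey : key = PySem.Str.slice key none (some (-4)) ++ "_min" :=
            pv_key_decomp key _ _ hmin rfl
          have hlk : List.lookup (PySem.Str.slice key none (some (-4)) ++ "_min") cond = some thr :=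
            pv_lookup_of_mem_nodup hnd (hkey ▸ hmem)
          rw [hlk] at hOk
          simp [hmin, hOk.1]
        · rw [not_not] at hmax
          have hne : PySem.Str.slice key (some (-4)) none ≠ "_min" := by
            rw [hmax]; decide
          have hkey : key = PySem.Str.slice key none (some (-4)) ++ "_max" :=
            pv_key_decomp key _ _ hmax rfl
          have hlk : List.lookup (PySem.Str.slice key none (some (-4)) ++ "_max") cond = some thr :=
            pv_lookup_of_mem_nodup hnd (hkey ▸ hmem)
          rw [hlk] at hOk
          simp [hne, hOk.2]

-- a violated _min condition makes B's per-item check fail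
theorem pv_okB_false_min (state : List (String × Int)) (attr : String) (m v : Int)
    (h1 : PySem.Str.slice (attr ++ "_min") (some (-4)) none = "_min")
    (h2 : PySem.Str.slice (attr ++ "_min") none (some (-4)) = attr)
    (h3 : attr ∈ pvAllowed)
    (hv : List.lookup attr state = some v) (hlt : v < m) :
    pvOkB state (attr ++ "_min", m) = false := by
  simp [pvOkB, h1, h2, h3, hv, hlt]

-- a violated _max condition makes B's per-item check fail
theorem pv_okB_false_max (state : List (String × Int)) (attr : String) (mx v : Int)
    (h1 : PySem.Str.slice (attr ++ "_max") (some (-4)) none = "_max")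
    (h2 : PySem.Str.slice (attr ++ "_max") none (some (-4)) = attr)
    (h3 : attr ∈ pvAllowed)
    (hv : List.lookup attr state = some v) (hgt : v > mx) :
    pvOkB state (attr ++ "_max", mx) = false := by
  simp only [pvOkB]
  rw [if_neg (by simp [h1]), h2, if_neg (by simp [h3]), hv]
  simp [h1, hgt]

theorem pv_main (state cond : List (String × Int)) (hnd : (cond.map Prod.fst).Nodup) :
    (["hp", "en", "st", "kpi", "risk", "cor"].all (pvOkA state cond))
      = cond.all (pvOkB state) := by
  rcases hA : ["hp", "en", "st", "kpi", "risk", "cor"].all (pvOkA state cond) with _ | _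
  · -- some attribute fails in A ⇒ some cond item fails in B
    symm
    rw [List.all_eq_false] at hA ⊢
    obtain ⟨attr, hmem, hfail⟩ := hA
    rw [Bool.not_eq_true] at hfail
    simp only [pvOkA] at hfail
    cases hv : List.lookup attr state with
    | none => rw [hv] at hfail; simp at hfail
    | some v =>
      rw [hv] at hfail
      rw [Bool.and_eq_false_iff] at hfail
      rcases hfail with hmin | hmax
      · cases hc : List.lookup (attr ++ "_min") cond with
        | none => rw [hc] at hmin; simp at hmin
        | some m =>
          rw [hc] at hmin
          simp only [Bool.not_eq_false', decide_eq_true_eq] at hmin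
          refine ⟨(attr ++ "_min", m), pv_lookup_mem hc, ?_⟩
          rw [Bool.not_eq_true]
          fin_cases hmem <;>
            exact pv_okB_false_min state _ m v (by decide) (by decide) (by decide) hv hmin
      · cases hc : List.lookup (attr ++ "_max") cond with
        | none => rw [hc] at hmax; simp at hmax
        | some mx =>
          rw [hc] at hmax
          simp only [Bool.not_eq_false', decide_eq_true_eq] at hmax
          refine ⟨(attr ++ "_max", mx), pv_lookup_mem hc, ?_⟩
          rw [Bool.not_eq_true]
          fin_cases hmem <;>
            exact pv_okB_false_max state _ mx v (by decide) (by decide) (by decide) hv hmax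
  · -- every attribute passes in A ⇒ every cond item passes in B
    symm
    rw [List.all_eq_true] at hA ⊢
    rintro ⟨key, thr⟩ hmem
    by_cases hs : PySem.Str.slice key (some (-4)) none ≠ "_min" ∧ PySem.Str.slice key (some (-4)) none ≠ "_max"
    · simp [pvOkB, hs]
    · by_cases ha : PySem.Str.slice key none (some (-4)) ∉ pvAllowed
      · simp only [pvOkB]
        rw [if_neg hs, if_pos ha]
      · rw [not_not] at ha
        have hsix : PySem.Str.slice key none (some (-4)) ∈ ["hp", "en", "st", "kpi", "risk", "cor"] := by
          simpa [pvAllowed] using ha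
        exact pv_okB_of_okA state cond hnd key thr hmem (hA _ hsix)

theorem check_threshold_py_spec : Claim_equal_check_threshold_py := by
  intro state cond _hdom hpre
  unfold Spec_check_threshold_py check_threshold_py check_threshold_py_alt
  rw [pvGoA_eq_all, pvGoB_eq_all]
  exact pv_main state cond hpre
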